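-- pv_equiv track=rewrite | github.com/spa46/programming_contest | baekjoon/doit/12891/12891.py | solve
-- ===== SOURCE A (Python) =====
-- def get_dna(ch, ss):
--     if ch == 'A':
--         ss[0] += 1
--     elif ch == 'C':
--         ss[1] += 1
--     elif ch == 'G':
--         ss[2] += 1
--     elif ch == 'T':
--         ss[3] += 1
--
-- def remove_dna(ch, ss):
--     if ch == 'A':
--         ss[0] -= 1
--     elif ch == 'C':
--         ss[1] -= 1
--     elif ch == 'G':
--         ss[2] -= 1
--     elif ch == 'T':
--         ss[3] -= 1
--
-- def solve(p, str, req):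
--     ss = [0, 0, 0, 0]
--     cnt = 0
--
--     i=0; j=0;
--     while j<p:
--         get_dna(str[j], ss)
--         j+=1
--
--     if req[0] <= ss[0] and req[1]<=ss[1] and req[2]<=ss[2] and req[3]<=ss[3]:
--         cnt += 1
--
--     while j<len(str):
--         get_dna(str[j], ss)
--         remove_dna(str[i], ss)
--
--         if req[0] <= ss[0] and req[1]<=ss[1] and req[2]<=ss[2] and req[3]<=ss[3]:
--             cnt += 1
--
--         i+=1; j+=1
--
--     return cnt
-- ===== SOURCE B (Python) =====
-- def solve(p, str, req):
--     # Prefix-count index: pref[i] holds the (A, C, G, T) counts of str[:i];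
--     # each window's counts are then two lookups and a subtraction.
--     pref = [(0, 0, 0, 0)]
--     a = c = g = t = 0
--     for ch in str:
--         if ch == 'A':
--             a += 1
--         elif ch == 'C':
--             c += 1
--         elif ch == 'G':
--             g += 1
--         elif ch == 'T':
--             t += 1
--         pref.append((a, c, g, t))
--
--     # the first window is str[:p], whose counts are the prefix entry pref[p] itself
--     a2, c2, g2, t2 = pref[p]
--     cnt = 1 if req[0] <= a2 and req[1] <= c2 and req[2] <= g2 and req[3] <= t2 else 0
--     for i in range(1, len(str) - p + 1):
--         a2, c2, g2, t2 = pref[i + p]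
--         a1, c1, g1, t1 = pref[i]
--         if req[0] <= a2 - a1 and req[1] <= c2 - c1 and req[2] <= g2 - g1 and req[3] <= t2 - t1:
--             cnt += 1
--     return cnt
-- ===== Notes on version B (the rewrite author's own statement) =====
-- stated objective: alternative
-- what changed: Replaces the incremental add/remove sliding window with a prefix-count index built in one pass, each window's counts being the difference of two prefix entries; Pre_ excludes p>len(str) and most too-short req (where A raises IndexError) and negative p, where there are no windows and A's returned count of phantom empty windows is accidental (B's prefix indexing raises there).
-- outside the precondition, e.g. on solve(-1, 'A', [0, 0, 0, 0]): A returns 2, B raises IndexError; on solve(1, 'C', [1]): A returns 0, B returns 0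
import Mathlib
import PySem

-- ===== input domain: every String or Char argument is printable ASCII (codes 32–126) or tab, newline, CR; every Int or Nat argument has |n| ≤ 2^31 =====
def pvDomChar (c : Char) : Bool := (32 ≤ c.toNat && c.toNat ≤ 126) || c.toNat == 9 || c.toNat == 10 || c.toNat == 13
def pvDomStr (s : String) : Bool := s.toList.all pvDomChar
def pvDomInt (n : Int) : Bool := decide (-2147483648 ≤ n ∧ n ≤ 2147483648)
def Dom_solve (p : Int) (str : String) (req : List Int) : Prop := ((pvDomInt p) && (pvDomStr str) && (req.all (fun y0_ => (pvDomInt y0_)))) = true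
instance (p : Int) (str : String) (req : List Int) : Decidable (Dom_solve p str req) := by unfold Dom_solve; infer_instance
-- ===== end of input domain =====

-- B replaces A's incremental add/remove sliding window by a prefix-count index built in
-- one pass, reading each window's counts as the difference of two prefix entries
-- (objective: alternative; same O(n) cost). A mutates its local list only; no caller-visible
-- side effects are at stake.

-- ===== PORT A =====
def getDna (ch : Char) (ss : Int × Int × Int × Int) : Int × Int × Int × Int :=
  if ch = 'A' then (ss.1 + 1, ss.2.1, ss.2.2.1, ss.2.2.2)
  else if ch = 'C' then (ss.1, ss.2.1 + 1, ss.2.2.1, ss.2.2.2)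
  else if ch = 'G' then (ss.1, ss.2.1, ss.2.2.1 + 1, ss.2.2.2)
  else if ch = 'T' then (ss.1, ss.2.1, ss.2.2.1, ss.2.2.2 + 1)
  else ss

def removeDna (ch : Char) (ss : Int × Int × Int × Int) : Int × Int × Int × Int :=
  if ch = 'A' then (ss.1 - 1, ss.2.1, ss.2.2.1, ss.2.2.2)
  else if ch = 'C' then (ss.1, ss.2.1 - 1, ss.2.2.1, ss.2.2.2)
  else if ch = 'G' then (ss.1, ss.2.1, ss.2.2.1 - 1, ss.2.2.2)
  else if ch = 'T' then (ss.1, ss.2.1, ss.2.2.1, ss.2.2.2 - 1)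
  else ss

-- 'req[0] <= ss[0] and …'; pyGetD's default is only reached outside Pre_ (req too short)
def reqOk (req : List Int) (ss : Int × Int × Int × Int) : Bool :=
  decide (PySem.List.pyGetD req 0 0 ≤ ss.1) && decide (PySem.List.pyGetD req 1 0 ≤ ss.2.1)
    && decide (PySem.List.pyGetD req 2 0 ≤ ss.2.2.1) && decide (PySem.List.pyGetD req 3 0 ≤ ss.2.2.2)

def solve (p : Int) (str : String) (req : List Int) : Int :=
  let cs := str.toList
  -- while j < p: get_dna(str[j], ss)   (str[j] out of range = IndexError, excluded by Pre_)
  let ss0 := (PySem.List.pyRange 0 p).foldl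
      (fun ss j => getDna (PySem.List.pyGetD cs j ' ') ss) (0, 0, 0, 0)
  let cnt0 : Int := if reqOk req ss0 then 1 else 0
  -- while j < len(str): …  (after the first loop j = max p 0, i = 0)
  let fin := (PySem.List.pyRange (max p 0) (cs.length : Int)).foldl
      (fun (st : Int × (Int × Int × Int × Int) × Int) j =>
        let ss := removeDna (PySem.List.pyGetD cs st.1 ' ') (getDna (PySem.List.pyGetD cs j ' ') st.2.1)
        (st.1 + 1, ss, st.2.2 + (if reqOk req ss then 1 else 0)))
      (0, ss0, cnt0)
  fin.2.2

-- ===== PORT B =====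
-- the if/elif chain of Source B's prefix-building loop
def bumpDna (ch : Char) (a c g t : Int) : Int × Int × Int × Int :=
  if ch = 'A' then (a + 1, c, g, t)
  else if ch = 'C' then (a, c + 1, g, t)
  else if ch = 'G' then (a, c, g + 1, t)
  else if ch = 'T' then (a, c, g, t + 1)
  else (a, c, g, t)

def solve_alt (p : Int) (str : String) (req : List Int) : Int :=
  let cs := str.toList
  -- one pass: pref[i] = counts of str[:i]
  let built := cs.foldl
      (fun (st : List (Int × Int × Int × Int) × (Int × Int × Int × Int)) ch =>
        let t := bumpDna ch st.2.1 st.2.2.1 st.2.2.2.1 st.2.2.2.2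
        (st.1 ++ [t], t))
      ([(0, 0, 0, 0)], (0, 0, 0, 0))
  let pref := built.1
  -- the first window is str[:p], whose counts are the prefix entry pref[p] itself
  let first := PySem.List.pyGetD pref p (0, 0, 0, 0)
  let cnt0 : Int := if reqOk req first then 1 else 0
  -- for i in range(1, len(str) - p + 1): compare pref[i+p] - pref[i] with req
  (PySem.List.pyRange 1 ((cs.length : Int) - p + 1)).foldl
    (fun cnt i =>
      let hi := PySem.List.pyGetD pref (i + p) (0, 0, 0, 0)
      let lo := PySem.List.pyGetD pref i (0, 0, 0, 0)
      if reqOk req (hi.1 - lo.1, hi.2.1 - lo.2.1, hi.2.2.1 - lo.2.2.1, hi.2.2.2 - lo.2.2.2)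
      then cnt + 1 else cnt)
    cnt0

-- ===== PRECONDITION & SPEC =====
-- A raises IndexError when p > len(str) (its fill loop runs off the end). Negative p is
-- excluded as an accidental corner: no windows of negative length exist, yet A returns a
-- count of phantom empty windows while B's prefix indexing raises there. With fewer than
-- four entries in req, A's short-circuiting 'and' chain returns only when a present
-- threshold fails before a missing req[k] is reached and raises otherwise; Pre_ admits the
-- closed-form such case (some present threshold exceeds the window length, so that
-- comparison is false whenever reached) and excludes the remaining short-req inputs.
def Pre_solve (p : Int) (str : String) (req : List Int) : Prop :=
  0 ≤ p ∧ p ≤ (str.toList.length : Int) ∧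
    (4 ≤ req.length ∨ req.any (fun t => p < t) = true)
instance (p : Int) (str : String) (req : List Int) : Decidable (Pre_solve p str req) := by
  unfold Pre_solve; infer_instance

def pvWitness_solve : Int × String × List Int := (2, "ACGTA", [1, 0, 0, 0])

def Spec_solve (p : Int) (str : String) (req : List Int) (out : Int) : Prop := out = solve_alt p str req
instance (p : Int) (str : String) (req : List Int) (out : Int) : Decidable (Spec_solve p str req out) := by unfold Spec_solve; infer_instance

-- ===== CLAIM (what is proved, stated in full; the proofs are below) =====
def Claim_equal_solve : Prop := ∀ (p : Int) (str : String) (req : List Int), Dom_solve p str req → Pre_solve p str req → Spec_solve p str req (solve p str req)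

-- ===== LEMMAS AND PROOFS =====

-- counts of a character list, as A's first loop accumulates them
def cntsA (l : List Char) : Int × Int × Int × Int :=
  l.foldl (fun ss ch => getDna ch ss) (0, 0, 0, 0)

def add4 (x y : Int × Int × Int × Int) : Int × Int × Int × Int :=
  (x.1 + y.1, x.2.1 + y.2.1, x.2.2.1 + y.2.2.1, x.2.2.2 + y.2.2.2)

lemma add4_zero_right (x : Int × Int × Int × Int) : add4 x (0, 0, 0, 0) = x := by
  simp [add4]

lemma add4_assoc (x y z : Int × Int × Int × Int) :
    add4 (add4 x y) z = add4 x (add4 y z) := by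
  simp [add4]; refine ⟨by ring, by ring, by ring, by ring⟩

lemma getDna_eq_add4 (c : Char) (x : Int × Int × Int × Int) :
    getDna c x = add4 x (getDna c (0, 0, 0, 0)) := by
  unfold getDna add4; split_ifs <;> simp

lemma removeDna_add4_getDna (c : Char) (x : Int × Int × Int × Int) :
    removeDna c (add4 (getDna c (0, 0, 0, 0)) x) = x := by
  unfold getDna removeDna add4; split_ifs <;> simp

lemma foldl_getDna_from (l : List Char) (x : Int × Int × Int × Int) :
    l.foldl (fun ss ch => getDna ch ss) x = add4 x (cntsA l) := by
  induction l generalizing x with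
  | nil => simp [cntsA, add4_zero_right]
  | cons c l ih =>
      show l.foldl _ (getDna c x) = add4 x (cntsA (c :: l))
      rw [ih (getDna c x)]
      have h2 : cntsA (c :: l) = add4 (getDna c (0, 0, 0, 0)) (cntsA l) := by
        show l.foldl _ (getDna c (0, 0, 0, 0)) = _
        rw [ih (getDna c (0, 0, 0, 0))]
      rw [h2, getDna_eq_add4, add4_assoc]

lemma cntsA_cons (c : Char) (l : List Char) :
    cntsA (c :: l) = add4 (getDna c (0, 0, 0, 0)) (cntsA l) := by
  show l.foldl _ (getDna c (0, 0, 0, 0)) = _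
  rw [foldl_getDna_from]

lemma cntsA_append (l₁ l₂ : List Char) :
    cntsA (l₁ ++ l₂) = add4 (cntsA l₁) (cntsA l₂) := by
  unfold cntsA
  rw [List.foldl_append, foldl_getDna_from]
  rfl

-- the window of length m starting at i, and its check
def win (cs : List Char) (i m : Nat) : List Char := (cs.drop i).take m

def okw (req : List Int) (cs : List Char) (m i : Nat) : Bool :=
  reqOk req (cntsA (win cs i m))

lemma getDna_window_step (cs : List Char) (i m : Nat) (h : i + m < cs.length) :
    removeDna (cs.getD i ' ')
      (getDna (cs.getD (i + m) ' ') (cntsA (win cs i m))) = cntsA (win cs (i + 1) m) := by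
  have hi : i < cs.length := by omega
  have h1 : win cs i m ++ [cs.getD (i + m) ' '] = cs.getD i ' ' :: win cs (i + 1) m := by
    have hd : (cs.drop i).take (m + 1) = (cs.drop i).take m ++ [cs.getD (i + m) ' '] := by
      rw [List.take_succ]
      have : (cs.drop i)[m]? = some (cs.getD (i + m) ' ') := by
        rw [List.getElem?_drop]
        rw [List.getElem?_eq_getElem (by omega)]
        simp [List.getD, List.getElem?_eq_getElem h]
      rw [this]; rfl
    have hc : cs.drop i = cs.getD i ' ' :: cs.drop (i + 1) := by
      have hg : cs.getD i ' ' = cs[i] := by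
        simp [List.getD, List.getElem?_eq_getElem hi]
      rw [hg]
      exact List.drop_eq_getElem_cons hi
    have : (cs.drop i).take (m + 1) = cs.getD i ' ' :: (cs.drop (i + 1)).take m := by
      rw [hc]; rfl
    rw [win, win, ← hd, this]
  have h2 : getDna (cs.getD (i + m) ' ') (cntsA (win cs i m))
      = cntsA (win cs i m ++ [cs.getD (i + m) ' ']) := by
    rw [cntsA_append, getDna_eq_add4]
    rfl
  rw [h2, h1, cntsA_cons, removeDna_add4_getDna]

-- A's second loop, unrolled into a sum of window checks
lemma loopA (req : List Int) (cs : List Char) (m : Nat) :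
    ∀ (t i : Nat) (cnt : Int), i + m + t = cs.length →
    ((PySem.List.pyRange ((i + m : Nat) : Int) ((cs.length : Nat) : Int)).foldl
      (fun (st : Int × (Int × Int × Int × Int) × Int) j =>
        let ss := removeDna (PySem.List.pyGetD cs st.1 ' ')
          (getDna (PySem.List.pyGetD cs j ' ') st.2.1)
        (st.1 + 1, ss, st.2.2 + (if reqOk req ss then 1 else 0)))
      (((i : Nat) : Int), cntsA (win cs i m), cnt)).2.2
    = cnt + ((List.range t).map (fun k => if okw req cs m (i + 1 + k) then (1 : Int) else 0)).sum := by
  intro t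
  induction t with
  | zero =>
      intro i cnt h
      rw [PySem.List.pyRange_one_eq_nil (by omega)]
      simp
  | succ t ih =>
      intro i cnt h
      rw [PySem.List.pyRange_one_cons (by exact_mod_cast by omega)]
      rw [List.foldl_cons]
      have hg1 : PySem.List.pyGetD cs ((i : Nat) : Int) ' ' = cs.getD i ' ' :=
        PySem.List.pyGetD_natCast cs i ' '
      have hg2 : PySem.List.pyGetD cs ((i + m : Nat) : Int) ' ' = cs.getD (i + m) ' ' :=
        PySem.List.pyGetD_natCast cs (i + m) ' '
      simp only [hg1, hg2, getDna_window_step cs i m (by omega)]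
      have hc1 : ((i : Nat) : Int) + 1 = (((i + 1 : Nat)) : Int) := by push_cast; ring
      have hc2 : ((i + m : Nat) : Int) + 1 = (((i + 1 + m : Nat)) : Int) := by push_cast; ring
      rw [hc1, hc2, ih (i + 1) _ (by omega)]
      rw [List.range_succ_eq_map, List.map_cons, List.sum_cons, List.map_map]
      simp only [Function.comp_def, Nat.succ_eq_add_one, Nat.add_zero]
      have harg : (fun k => if okw req cs m (i + 1 + (k + 1)) then (1 : Int) else 0)
          = (fun k => if okw req cs m (i + 1 + 1 + k) then (1 : Int) else 0) := by
        funext k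
        have : i + 1 + (k + 1) = i + 1 + 1 + k := by omega
        rw [this]
      rw [harg]
      simp only [okw]
      rw [add_assoc]
      rfl

lemma getD_eq_getElem (cs : List Char) (i : Nat) (h : i < cs.length) :
    cs.getD i ' ' = cs[i] := by
  simp [List.getD, List.getElem?_eq_getElem h]

lemma cntsA_append_singleton (l : List Char) (c : Char) :
    cntsA (l ++ [c]) = getDna c (cntsA l) := by
  rw [cntsA_append, getDna_eq_add4]
  rfl

-- A's first fill loop computes the counts of the first m characters
lemma firstA (cs : List Char) (m : Nat) (hm : m ≤ cs.length) :
    (List.range m).foldl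
      (fun ss k => getDna (PySem.List.pyGetD cs ((k : Nat) : Int) ' ') ss) (0, 0, 0, 0)
    = cntsA (cs.take m) := by
  induction m with
  | zero => simp [cntsA]
  | succ m ih =>
      rw [List.range_succ, List.foldl_append, ih (by omega)]
      show getDna (PySem.List.pyGetD cs ((m : Nat) : Int) ' ') (cntsA (cs.take m)) = _
      rw [PySem.List.pyGetD_natCast, getD_eq_getElem cs m (by omega), List.take_succ,
        List.getElem?_eq_getElem (by omega : m < cs.length)]
      exact (cntsA_append_singleton _ _).symm

-- Source B's building-loop body agrees with A's helper on the packed tuple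
lemma bump_eq (ch : Char) (s : Int × Int × Int × Int) :
    bumpDna ch s.1 s.2.1 s.2.2.1 s.2.2.2 = getDna ch s := rfl

-- B's one pass builds the full prefix-count index
lemma buildB (cs : List Char) :
    cs.foldl
      (fun (st : List (Int × Int × Int × Int) × (Int × Int × Int × Int)) ch =>
        (st.1 ++ [bumpDna ch st.2.1 st.2.2.1 st.2.2.2.1 st.2.2.2.2],
         bumpDna ch st.2.1 st.2.2.1 st.2.2.2.1 st.2.2.2.2))
      ([(0, 0, 0, 0)], (0, 0, 0, 0))
    = ((List.range (cs.length + 1)).map (fun i => cntsA (cs.take i)), cntsA cs) := by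
  induction cs using List.reverseRecOn with
  | nil => simp [cntsA]
  | append_singleton l c ih =>
      rw [List.foldl_append, ih, List.foldl_cons, List.foldl_nil]
      rw [bump_eq c (cntsA l), ← cntsA_append_singleton l c]
      refine Prod.ext ?_ rfl
      show List.map (fun i => cntsA (List.take i l)) (List.range (l.length + 1)) ++ [cntsA (l ++ [c])]
          = List.map (fun i => cntsA (List.take i (l ++ [c]))) (List.range ((l ++ [c]).length + 1))
      have hlen : (l ++ [c]).length + 1 = (l.length + 1) + 1 := by simp
      rw [hlen]
      conv_rhs => rw [List.range_succ]
      rw [List.map_append]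
      congr 1
      · apply List.map_congr_left
        intro i hi
        rw [List.mem_range] at hi
        rw [List.take_append_of_le_length (by omega)]
      · rw [List.map_singleton, List.take_of_length_le (by simp)]

lemma buildB_fst (cs : List Char) :
    (cs.foldl
      (fun (st : List (Int × Int × Int × Int) × (Int × Int × Int × Int)) ch =>
        (st.1 ++ [bumpDna ch st.2.1 st.2.2.1 st.2.2.2.1 st.2.2.2.2],
         bumpDna ch st.2.1 st.2.2.1 st.2.2.2.1 st.2.2.2.2))
      ([(0, 0, 0, 0)], (0, 0, 0, 0))).1
    = (List.range (cs.length + 1)).map (fun i => cntsA (cs.take i)) := by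
  rw [buildB]

lemma sub4_add4 (x w : Int × Int × Int × Int) :
    ((add4 x w).1 - x.1, (add4 x w).2.1 - x.2.1,
     (add4 x w).2.2.1 - x.2.2.1, (add4 x w).2.2.2 - x.2.2.2) = w := by
  simp [add4]

lemma foldl_ite_to_add {a : Type} (C : a -> Bool) (l : List a) (init : Int) :
    l.foldl (fun x y => if C y then x + 1 else x) init
      = l.foldl (fun x y => x + (if C y then 1 else 0)) init := by
  induction l generalizing init with
  | nil => rfl
  | cons c l ih =>
      simp only [List.foldl_cons]
      rw [ih]
      cases h : C c <;> simp

-- B as the first window's check plus a sum over the slid windows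
lemma altB (p : Int) (str : String) (req : List Int) (m : Nat)
    (hp : p = (m : Int)) (hm : m ≤ str.toList.length) :
    solve_alt p str req
    = (if okw req str.toList m 0 then (1 : Int) else 0)
      + ((List.range (str.toList.length - m)).map
          (fun k => if okw req str.toList m (1 + k) then (1 : Int) else 0)).sum := by
  simp only [solve_alt]
  rw [buildB_fst, hp]
  have hb : ((str.toList.length : Int) - (m : Int) + 1)
      = ((str.toList.length - m + 1 : Nat) : Int) := by omega
  rw [hb, PySem.List.pyRange_one]
  have h2 : ((((str.toList.length - m + 1 : Nat)) : Int) - 1).toNat = str.toList.length - m := by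
    omega
  rw [h2, List.foldl_map, foldl_ite_to_add, PySem.List.foldl_add]
  congr 1
  · -- the first window: pref[m] is the counts of str[:m]
    rw [PySem.List.pyGetD_natCast,
      PySem.List.getD_map_range _ _ _ _ (by omega), okw, win, List.drop_zero]
  · refine congrArg List.sum (List.map_congr_left ?_)
    intro k hk
    rw [List.mem_range] at hk
    have h3 : (1 : Int) + (k : Nat) + (m : Int) = ((1 + k + m : Nat) : Int) := by push_cast; ring
    have h4 : (1 : Int) + (k : Nat) = ((1 + k : Nat) : Int) := by push_cast; ring
    rw [h3, h4, PySem.List.pyGetD_natCast, PySem.List.pyGetD_natCast]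
    rw [PySem.List.getD_map_range _ _ _ _ (by omega), PySem.List.getD_map_range _ _ _ _ (by omega)]
    rw [List.take_add, cntsA_append, sub4_add4]
    simp [okw, win]

-- A, assembled: the first window's check plus the checks of the slid windows
lemma totalA (p : Int) (str : String) (req : List Int) (m : Nat)
    (hw : max p 0 = (m : Int)) (hm : m ≤ str.toList.length) :
    solve p str req
    = (if okw req str.toList m 0 then (1 : Int) else 0)
      + ((List.range (str.toList.length - m)).map
          (fun k => if okw req str.toList m (1 + k) then (1 : Int) else 0)).sum := by
  simp only [solve]
  have hpm : p.toNat = m := by omega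
  rw [hw, PySem.List.pyRange_zero, List.foldl_map, hpm, firstA str.toList m hm]
  have hA := loopA req str.toList m (str.toList.length - m) 0
    (if reqOk req (cntsA (str.toList.take m)) then (1 : Int) else 0) (by omega)
  simp only [Nat.zero_add, Nat.cast_zero, win, List.drop_zero] at hA
  rw [hA]
  simp [okw, win]

theorem solve_spec : Claim_equal_solve := by
  intro p str req _ hpre
  obtain ⟨hp0, hlen, _⟩ := hpre
  have hw : max p 0 = (p.toNat : Int) := (Int.toNat_eq_max p).symm
  have hp : p = (p.toNat : Int) := by omega
  have hm : p.toNat ≤ str.toList.length := by omega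
  unfold Spec_solve
  rw [totalA p str req p.toNat hw hm, altB p str req p.toNat hp hm]
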